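-- pv_equiv track=rewrite | github.com/Munikumar09/tailor | backend/resume_tailor/keyword_gap_analyzer.py | lexical_prefilter
-- ===== SOURCE A (Python) =====
-- from typing import Callable, Dict, List, Optional, Set, Tuple
--
-- def stem_set(tokens: List[str]) -> Set[str]:
--     """Return a set of crude stems for a list of tokens.
--
--     Intuition: a simple rule-based stemmer is fast and good enough for
--     overlap detection. We don't need the sophistication of Porter/Snowball
--     because we're only using stems to *pre-filter* candidates, not for
--     final scoring. Better to have a fast false-positive than a slow miss.
--
--     The suffixes are tried in order; only the first match is stripped.
--     A minimum stem length of 3 prevents over-stemming short words.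
--
--     Args:
--         tokens: Already-lowercased tokens.
--
--     Returns:
--         Set of stems (may be smaller than ``tokens`` if some share a stem).
--     """
--     stems: Set[str] = set()
--     for t in tokens:
--         s = t
--         for suffix in ("ing", "tion", "ed", "er", "es", "s"):
--             if t.endswith(suffix) and len(t) - len(suffix) >= 3:
--                 s = t[: -len(suffix)]
--                 break  # Only strip one suffix per token
--         stems.add(s)
--     return stems
--
-- def lexical_prefilter(
--     jd_terms: List[str],
--     resume_phrases: List[str],
-- ) -> Dict[str, List[str]]:
--     """Return resume phrases that share at least one token with each JD term.
--
--     This is the fallback pre-filter used when ``rank_bm25`` is not installed.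
--     It's cheaper than BM25 but less ranked: any overlap (exact token, first
--     token, or shared stem) counts as a candidate.
--
--     Intuition: we want to pass only *plausible* candidates to the expensive
--     embedding step. A resume phrase like ``"REST API design"`` shares the token
--     ``"api"`` with the JD term ``"api development"``, so it's worth embedding
--     even though the phrases aren't identical.
--
--     Three overlap criteria (any one is sufficient):
--       1. **Token intersection**: the sets of words overlap directly.
--       2. **First-token match**: the JD term's first word appears anywhere in
--          the resume phrase (catches e.g. ``"Python"`` matching
--          ``"Python scripting"``).
--       3. **Stem intersection**: after light stemming, the token sets overlap
--          (catches ``"deploy"`` matching ``"deployment"``).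
--
--     Args:
--         jd_terms:      List of JD phrases to match against.
--         resume_phrases: All phrases extracted from the candidate's resume.
--
--     Returns:
--         Dict mapping each matched JD term to a list of plausible resume phrases.
--         JD terms with zero candidates are omitted.
--     """
--     # Pre-compute token and stem sets for all resume phrases once — O(n) not O(n×m)
--     resume_tokens = [set(p.split()) for p in resume_phrases]
--     resume_stems = [stem_set(p.split()) for p in resume_phrases]
--     candidates: Dict[str, List[str]] = {}
--
--     for jd_term in jd_terms:
--         jd_tok = set(jd_term.split())
--         jd_stem = stem_set(list(jd_tok))
--         first = jd_term.split()[0] if jd_term.split() else ""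
--         matched = []
--         for i, phrase in enumerate(resume_phrases):
--             if (
--                 jd_tok & resume_tokens[i]           # exact token overlap
--                 or (first and first in resume_tokens[i])  # first-word heuristic
--                 or jd_stem & resume_stems[i]        # stem overlap
--             ):
--                 matched.append(phrase)
--         if matched:
--             candidates[jd_term] = matched
--
--     return candidates
-- ===== SOURCE B (Python) =====
-- def stem_set(tokens):
--     stems = set()
--     for t in tokens:
--         s = t
--         for suffix in ("ing", "tion", "ed", "er", "es", "s"):
--             if t.endswith(suffix) and len(t) - len(suffix) >= 3:
--                 s = t[: -len(suffix)]
--                 break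
--         stems.add(s)
--     return stems
--
--
-- def lexical_prefilter(jd_terms, resume_phrases):
--     # Inverted indexes: token -> ascending phrase indices, stem -> ascending phrase indices.
--     tok_index = {}
--     stem_index = {}
--     for i, phrase in enumerate(resume_phrases):
--         for t in set(phrase.split()):
--             tok_index.setdefault(t, []).append(i)
--         for s in stem_set(phrase.split()):
--             stem_index.setdefault(s, []).append(i)
--
--     candidates = {}
--     for term in jd_terms:
--         idxs = set()
--         for t in set(term.split()):
--             idxs.update(tok_index.get(t, ()))
--         for s in stem_set(term.split()):
--             idxs.update(stem_index.get(s, ()))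
--         if idxs:
--             candidates[term] = [resume_phrases[i] for i in sorted(idxs)]
--     return candidates
-- ===== Notes on version B (the rewrite author's own statement) =====
-- stated objective: faster
-- what changed: B builds inverted indexes from tokens and stems to ascending resume-phrase indices once, then answers each JD term by unioning postings and sorting the index set, instead of A's scan of every resume phrase per JD term; the redundant first-token clause (its first token is already in the term's token set) is dropped.
import Mathlib
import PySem

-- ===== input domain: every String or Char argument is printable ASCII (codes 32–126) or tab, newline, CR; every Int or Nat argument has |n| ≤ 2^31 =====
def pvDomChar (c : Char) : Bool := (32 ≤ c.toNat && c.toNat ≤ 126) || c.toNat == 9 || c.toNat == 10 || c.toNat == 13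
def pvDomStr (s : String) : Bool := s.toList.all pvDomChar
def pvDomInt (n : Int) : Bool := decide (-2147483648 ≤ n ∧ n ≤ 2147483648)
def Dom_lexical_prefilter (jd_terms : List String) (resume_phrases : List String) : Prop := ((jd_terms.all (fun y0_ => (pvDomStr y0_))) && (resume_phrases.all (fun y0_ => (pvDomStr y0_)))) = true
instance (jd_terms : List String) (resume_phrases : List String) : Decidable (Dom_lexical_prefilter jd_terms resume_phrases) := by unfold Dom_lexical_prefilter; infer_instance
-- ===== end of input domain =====

-- B replaces A's per-JD-term scan of all resume phrases by inverted token/stem indexes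
-- built once over the resume phrases (faster; A's redundant first-token clause dropped).


-- ===== PORT A =====
-- shared helper: the inner suffix loop of stem_set (first matching suffix is stripped)
def pvStem (t : String) : String :=
  match (["ing", "tion", "ed", "er", "es", "s"]).find?
      (fun suffix => PySem.Str.endswith t suffix && decide (3 ≤ PySem.Str.len t - PySem.Str.len suffix)) with
  | some suffix => PySem.Str.slice t none (some (-(PySem.Str.len suffix)))
  | none => t

-- helper stem_set, used by both Pythons
def stem_set (tokens : List String) : PySem.Set String :=
  tokens.foldl (fun stems t => PySem.Set.add stems (pvStem t)) PySem.Set.empty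

-- token set and stem set of one phrase (used by both ports)
def pvTokF (p : String) : PySem.Set String := PySem.Set.ofList (PySem.Str.split₀ p)
def pvStemF (p : String) : PySem.Set String := stem_set (PySem.Str.split₀ p)
-- jd_term.split()[0] if jd_term.split() else ""
def pvFirst (term : String) : String :=
  match PySem.Str.split₀ term with
  | [] => ""
  | w :: _ => w

def lexical_prefilter (jd_terms : List String) (resume_phrases : List String) : List (String × List String) :=
  let resume_tokens := resume_phrases.map pvTokF
  let resume_stems := resume_phrases.map pvStemF
  let candidates := jd_terms.foldl (fun (cand : PySem.Dict String (List String)) jd_term =>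
    let jd_tok : PySem.Set String := pvTokF jd_term
    let jd_stem := stem_set jd_tok
    let first : String := pvFirst jd_term
    let matched := (PySem.List.enumerate resume_phrases).foldl (fun m ip =>
      if (!(PySem.Set.inter jd_tok (PySem.List.pyGetD resume_tokens ip.1 [])).isEmpty
          || (first != "" && PySem.Set.contains (PySem.List.pyGetD resume_tokens ip.1 []) first)
          || !(PySem.Set.inter jd_stem (PySem.List.pyGetD resume_stems ip.1 [])).isEmpty) then
        m ++ [ip.2]
      else m) []
    if !matched.isEmpty then cand.insert jd_term matched else cand) PySem.Dict.empty
  candidates.items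

-- ===== PORT B =====
-- inverted index: key (token or stem of a phrase) -> list of phrase indices, ascending
def pvBuildIndex (f : String → List String) (resume_phrases : List String) : PySem.Dict String (List Int) :=
  (PySem.List.enumerate resume_phrases).foldl (fun d ip =>
    (f ip.2).foldl (fun d t => d.insert t (d.getD t [] ++ [ip.1])) d) PySem.Dict.empty

-- idxs.update(index.get(t, ())) for each key
def pvGather (d : PySem.Dict String (List Int)) (keys : List String) (s : PySem.Set Int) : PySem.Set Int :=
  keys.foldl (fun s t => PySem.Set.update s (d.getD t [])) s

def lexical_prefilter_alt (jd_terms : List String) (resume_phrases : List String) : List (String × List String) :=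
  let tok_index := pvBuildIndex pvTokF resume_phrases
  let stem_index := pvBuildIndex pvStemF resume_phrases
  let candidates := jd_terms.foldl (fun (cand : PySem.Dict String (List String)) term =>
    let idxs := pvGather stem_index (pvStemF term)
      (pvGather tok_index (pvTokF term) PySem.Set.empty)
    if !idxs.isEmpty then
      cand.insert term ((PySem.List.sorted idxs (fun x => x) false).map
        (fun i => PySem.List.pyGetD resume_phrases i ""))
    else cand) PySem.Dict.empty
  candidates.items

-- ===== PRECONDITION & SPEC =====
def Spec_lexical_prefilter (jd_terms : List String) (resume_phrases : List String) (out : List (String × List String)) : Prop := out = lexical_prefilter_alt jd_terms resume_phrases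
instance (jd_terms : List String) (resume_phrases : List String) (out : List (String × List String)) : Decidable (Spec_lexical_prefilter jd_terms resume_phrases out) := by unfold Spec_lexical_prefilter; infer_instance

-- ===== CLAIM (what is proved, stated in full; the proofs are below) =====
def Claim_equal_lexical_prefilter : Prop := ∀ (jd_terms : List String) (resume_phrases : List String), Dom_lexical_prefilter jd_terms resume_phrases → Spec_lexical_prefilter jd_terms resume_phrases (lexical_prefilter jd_terms resume_phrases)

-- ===== LEMMAS AND PROOFS =====

-- membership in a stem-accumulating fold
lemma mem_foldl_add_stem (l : List String) (acc : PySem.Set String) (x : String) :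
    x ∈ l.foldl (fun s t => PySem.Set.add s (pvStem t)) acc ↔ x ∈ acc ∨ ∃ t ∈ l, pvStem t = x := by
  induction l generalizing acc with
  | nil => simp
  | cons h tl ih =>
    simp only [List.foldl_cons, ih, PySem.Set.mem_add, List.mem_cons]
    constructor
    · rintro ((hx | hx) | ⟨t, ht, hx⟩)
      · exact Or.inl hx
      · exact Or.inr ⟨h, Or.inl rfl, hx.symm⟩
      · exact Or.inr ⟨t, Or.inr ht, hx⟩
    · rintro (hx | ⟨t, (rfl | ht), hx⟩)
      · exact Or.inl (Or.inl hx)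
      · exact Or.inl (Or.inr hx.symm)
      · exact Or.inr ⟨t, ht, hx⟩

lemma mem_stem_set (l : List String) (x : String) :
    x ∈ stem_set l ↔ ∃ t ∈ l, pvStem t = x := by
  simp [stem_set, mem_foldl_add_stem, PySem.Set.empty]

-- one phrase's contribution to an inverted index
lemma mem_indexStep (l : List String) (d : PySem.Dict String (List Int)) (j : Int) (t : String) (i : Int) :
    i ∈ (l.foldl (fun d t' => d.insert t' (d.getD t' [] ++ [j])) d).getD t [] ↔
      i ∈ d.getD t [] ∨ (t ∈ l ∧ i = j) := by
  induction l generalizing d with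
  | nil => simp
  | cons h tl ih =>
    simp only [List.foldl_cons, ih, PySem.Dict.getD_insert, List.mem_cons]
    by_cases ht : t = h
    · subst ht
      simp only [if_true, List.mem_append, List.mem_singleton]
      tauto
    · simp [ht]

-- membership in the whole inverted index
lemma mem_buildIndex_aux (f : String → List String) (rp : List String) (s : Int)
    (d : PySem.Dict String (List Int)) (t : String) (i : Int) :
    i ∈ ((PySem.List.enumerate rp s).foldl (fun d ip =>
          (f ip.2).foldl (fun d t' => d.insert t' (d.getD t' [] ++ [ip.1])) d) d).getD t [] ↔
      i ∈ d.getD t [] ∨ ∃ k : Nat, k < rp.length ∧ i = s + (k : Int) ∧ t ∈ f (rp.getD k "") := by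
  induction rp generalizing s d with
  | nil => simp [PySem.List.enumerate_nil]
  | cons p ps ih =>
    rw [PySem.List.enumerate_cons]
    simp only [List.foldl_cons, ih, mem_indexStep]
    constructor
    · rintro ((hd | ⟨hp, rfl⟩) | ⟨k, hk, rfl, hmem⟩)
      · exact Or.inl hd
      · exact Or.inr ⟨0, by simp, by simp, by simpa using hp⟩
      · exact Or.inr ⟨k + 1, by simpa using hk, by push_cast; ring, by simpa using hmem⟩
    · rintro (hd | ⟨k, hk, rfl, hmem⟩)
      · exact Or.inl (Or.inl hd)
      · cases k with
        | zero => exact Or.inl (Or.inr ⟨by simpa using hmem, by simp⟩)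
        | succ k => exact Or.inr ⟨k, by simpa using hk, by push_cast; ring, by simpa using hmem⟩

lemma mem_buildIndex (f : String → List String) (rp : List String) (t : String) (i : Int) :
    i ∈ (pvBuildIndex f rp).getD t [] ↔
      ∃ k : Nat, k < rp.length ∧ i = (k : Int) ∧ t ∈ f (rp.getD k "") := by
  simpa using mem_buildIndex_aux f rp 0 PySem.Dict.empty t i

lemma mem_gather (d : PySem.Dict String (List Int)) (keys : List String) (s0 : PySem.Set Int) (i : Int) :
    i ∈ pvGather d keys s0 ↔ i ∈ s0 ∨ ∃ t ∈ keys, i ∈ d.getD t [] := by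
  induction keys generalizing s0 with
  | nil => simp [pvGather]
  | cons h tl ih =>
    simp only [pvGather, List.foldl_cons] at *
    rw [ih]
    simp [PySem.Set.mem_update]
    tauto

lemma nodup_gather (d : PySem.Dict String (List Int)) (keys : List String) (s0 : PySem.Set Int)
    (h : s0.Nodup) : (pvGather d keys s0).Nodup := by
  induction keys generalizing s0 with
  | nil => exact h
  | cons k tl ih => exact ih _ (PySem.Set.nodup_update _ _ h)

-- Python truthiness of a set intersection
lemma inter_not_isEmpty_iff (a b : PySem.Set String) :
    (!(PySem.Set.inter a b).isEmpty) = true ↔ ∃ x, x ∈ a ∧ x ∈ b := by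
  rw [Bool.not_eq_eq_eq_not, Bool.not_true, List.isEmpty_eq_false_iff_exists_mem]
  simp [PySem.Set.mem_inter]


lemma mem_stem_set_ofList (l : List String) (x : String) :
    x ∈ stem_set (PySem.Set.ofList l) ↔ x ∈ stem_set l := by
  simp [mem_stem_set, PySem.Set.mem_ofList]

lemma pvFirst_cases (term : String) :
    pvFirst term = "" ∨ pvFirst term ∈ pvTokF term := by
  unfold pvFirst pvTokF
  cases h : PySem.Str.split₀ term with
  | nil => exact Or.inl rfl
  | cons w ws => exact Or.inr (by simp [PySem.Set.mem_ofList])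

-- A's three-clause test is the two-clause overlap condition (the first-token clause is subsumed)
lemma pvPredA_iff (term q : String) :
    ((!(PySem.Set.inter (pvTokF term) (pvTokF q)).isEmpty
      || (pvFirst term != "" && PySem.Set.contains (pvTokF q) (pvFirst term))
      || !(PySem.Set.inter (stem_set (pvTokF term)) (pvStemF q)).isEmpty) = true)
    ↔ ((∃ t, t ∈ pvTokF term ∧ t ∈ pvTokF q) ∨ (∃ x, x ∈ pvStemF term ∧ x ∈ pvStemF q)) := by
  simp only [Bool.or_eq_true, Bool.and_eq_true, inter_not_isEmpty_iff, bne_iff_ne, ne_eq,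
    PySem.Set.contains_iff]
  constructor
  · rintro ((h | ⟨hne, hmem⟩) | ⟨x, hx1, hx2⟩)
    · exact Or.inl h
    · rcases pvFirst_cases term with h0 | h0
      · exact absurd h0 hne
      · exact Or.inl ⟨pvFirst term, h0, hmem⟩
    · exact Or.inr ⟨x, (mem_stem_set_ofList _ _).mp hx1, hx2⟩
  · rintro (h | ⟨x, hx1, hx2⟩)
    · exact Or.inl (Or.inl h)
    · exact Or.inr ⟨x, (mem_stem_set_ofList _ _).mpr hx1, hx2⟩

-- the gathered index set of B, characterised
lemma mem_idxs (rp : List String) (term : String) (i : Int) :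
    i ∈ pvGather (pvBuildIndex pvStemF rp) (pvStemF term)
          (pvGather (pvBuildIndex pvTokF rp) (pvTokF term) PySem.Set.empty) ↔
      ∃ k : Nat, k < rp.length ∧ i = (k : Int) ∧
        ((∃ t, t ∈ pvTokF term ∧ t ∈ pvTokF (rp.getD k "")) ∨
         (∃ x, x ∈ pvStemF term ∧ x ∈ pvStemF (rp.getD k ""))) := by
  rw [mem_gather, mem_gather]
  simp only [mem_buildIndex, PySem.Set.empty, List.not_mem_nil, false_or]
  constructor
  · rintro ((⟨t, ht, k, hk, rfl, hm⟩) | ⟨x, hx, k, hk, rfl, hm⟩)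
    · exact ⟨k, hk, rfl, Or.inl ⟨t, ht, hm⟩⟩
    · exact ⟨k, hk, rfl, Or.inr ⟨x, hx, hm⟩⟩
  · rintro ⟨k, hk, rfl, (⟨t, ht, hm⟩ | ⟨x, hx, hm⟩)⟩
    · exact Or.inl ⟨t, ht, k, hk, rfl, hm⟩
    · exact Or.inr ⟨x, hx, k, hk, rfl, hm⟩

-- A's per-term matched list equals B's sorted-index mapping
lemma matched_eq (rp : List String) (term : String) :
    (PySem.List.enumerate rp).foldl (fun m ip =>
      if (!(PySem.Set.inter (pvTokF term) (PySem.List.pyGetD (rp.map pvTokF) ip.1 [])).isEmpty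
          || (pvFirst term != "" && PySem.Set.contains (PySem.List.pyGetD (rp.map pvTokF) ip.1 []) (pvFirst term))
          || !(PySem.Set.inter (stem_set (pvTokF term)) (PySem.List.pyGetD (rp.map pvStemF) ip.1 [])).isEmpty) then
        m ++ [ip.2]
      else m) []
    = (PySem.List.sorted (pvGather (pvBuildIndex pvStemF rp) (pvStemF term)
          (pvGather (pvBuildIndex pvTokF rp) (pvTokF term) PySem.Set.empty)) (fun x => x) false).map
        (fun i => PySem.List.pyGetD rp i "") := by
  rw [PySem.List.foldl_append_if]
  set P : Int × String → Bool := fun ip =>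
      (!(PySem.Set.inter (pvTokF term) (PySem.List.pyGetD (rp.map pvTokF) ip.1 [])).isEmpty
        || (pvFirst term != "" && PySem.Set.contains (PySem.List.pyGetD (rp.map pvTokF) ip.1 []) (pvFirst term))
        || !(PySem.Set.inter (stem_set (pvTokF term)) (PySem.List.pyGetD (rp.map pvStemF) ip.1 [])).isEmpty)
    with hP
  have hPat : ∀ (k : Nat), k < rp.length →
      (P ((0 : Int) + (k : Int), rp.getD k "") = true ↔
        ((∃ t, t ∈ pvTokF term ∧ t ∈ pvTokF (rp.getD k "")) ∨
         (∃ x, x ∈ pvStemF term ∧ x ∈ pvStemF (rp.getD k "")))) := by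
    intro k hk
    have hz : (0 : Int) + (k : Int) = ((k : Nat) : Int) := by ring
    have hmap : ∀ (f : String → PySem.Set String),
        PySem.List.pyGetD (rp.map f) ((k : Nat) : Int) [] = f (rp.getD k "") := by
      intro f
      rw [PySem.List.pyGetD_natCast]
      simp [List.getD_eq_getElem?_getD, hk]
    rw [hP]
    simp only [hz, hmap]
    exact pvPredA_iff term (rp.getD k "")
  have hidxsN : (pvGather (pvBuildIndex pvStemF rp) (pvStemF term)
      (pvGather (pvBuildIndex pvTokF rp) (pvTokF term) PySem.Set.empty)).Nodup :=
    nodup_gather _ _ _ (nodup_gather _ _ _ List.nodup_nil)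
  have hpwys : (((PySem.List.enumerate rp).filter P).map (fun ip => ip.1)).Pairwise (· < ·) :=
    List.pairwise_map.mpr ((PySem.List.pairwise_lt_enumerate rp 0).filter P)
  have hys : PySem.List.sorted (pvGather (pvBuildIndex pvStemF rp) (pvStemF term)
        (pvGather (pvBuildIndex pvTokF rp) (pvTokF term) PySem.Set.empty)) (fun x => x) false
      = ((PySem.List.enumerate rp).filter P).map (fun ip => ip.1) := by
    apply PySem.List.sorted_eq_of_perm_of_pairwise_lt
    · rw [List.perm_ext_iff_of_nodup (hpwys.imp ne_of_lt) hidxsN]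
      intro i
      rw [mem_idxs]
      simp only [List.mem_map, List.mem_filter, PySem.List.mem_enumerate_iff]
      constructor
      · rintro ⟨ip, ⟨⟨k, hk, rfl⟩, hp⟩, rfl⟩
        have hg : rp.getD k "" = rp[k] := List.getD_eq_getElem rp "" hk
        refine ⟨k, hk, by simp, ?_⟩
        apply (hPat k hk).mp
        rw [hg]
        exact hp
      · rintro ⟨k, hk, rfl, hcond⟩
        have hg : rp.getD k "" = rp[k] := List.getD_eq_getElem rp "" hk
        refine ⟨((0 : Int) + (k : Int), rp[k]), ⟨⟨k, hk, rfl⟩, ?_⟩, by simp⟩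
        have h3 := (hPat k hk).mpr hcond
        rwa [hg] at h3
    · exact hpwys
  rw [hys, List.map_map, List.nil_append]
  apply List.map_congr_left
  intro ip hip
  have h1 := (List.mem_filter.mp hip).1
  rw [PySem.List.mem_enumerate_iff] at h1
  obtain ⟨k, hk, rfl⟩ := h1
  have hz : (0 : Int) + (k : Int) = ((k : Nat) : Int) := by ring
  simp only [Function.comp, hz]
  rw [PySem.List.pyGetD_natCast, List.getD_eq_getElem rp "" hk]

lemma step_eq (rp : List String) :
    (fun (cand : PySem.Dict String (List String)) jd_term =>
      if !((PySem.List.enumerate rp).foldl (fun m ip =>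
          if (!(PySem.Set.inter (pvTokF jd_term) (PySem.List.pyGetD (rp.map pvTokF) ip.1 [])).isEmpty
              || (pvFirst jd_term != "" && PySem.Set.contains (PySem.List.pyGetD (rp.map pvTokF) ip.1 []) (pvFirst jd_term))
              || !(PySem.Set.inter (stem_set (pvTokF jd_term)) (PySem.List.pyGetD (rp.map pvStemF) ip.1 [])).isEmpty) then
            m ++ [ip.2]
          else m) []).isEmpty then
        cand.insert jd_term ((PySem.List.enumerate rp).foldl (fun m ip =>
          if (!(PySem.Set.inter (pvTokF jd_term) (PySem.List.pyGetD (rp.map pvTokF) ip.1 [])).isEmpty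
              || (pvFirst jd_term != "" && PySem.Set.contains (PySem.List.pyGetD (rp.map pvTokF) ip.1 []) (pvFirst jd_term))
              || !(PySem.Set.inter (stem_set (pvTokF jd_term)) (PySem.List.pyGetD (rp.map pvStemF) ip.1 [])).isEmpty) then
            m ++ [ip.2]
          else m) [])
      else cand)
    = (fun (cand : PySem.Dict String (List String)) term =>
      if !(pvGather (pvBuildIndex pvStemF rp) (pvStemF term)
            (pvGather (pvBuildIndex pvTokF rp) (pvTokF term) PySem.Set.empty)).isEmpty then
        cand.insert term ((PySem.List.sorted (pvGather (pvBuildIndex pvStemF rp) (pvStemF term)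
            (pvGather (pvBuildIndex pvTokF rp) (pvTokF term) PySem.Set.empty)) (fun x => x) false).map
          (fun i => PySem.List.pyGetD rp i ""))
      else cand) := by
  funext cand term
  rw [matched_eq rp term]
  have h2 : ((PySem.List.sorted (pvGather (pvBuildIndex pvStemF rp) (pvStemF term)
        (pvGather (pvBuildIndex pvTokF rp) (pvTokF term) PySem.Set.empty)) (fun x => x) false).map
      (fun i => PySem.List.pyGetD rp i "")).isEmpty
      = (pvGather (pvBuildIndex pvStemF rp) (pvStemF term)
          (pvGather (pvBuildIndex pvTokF rp) (pvTokF term) PySem.Set.empty)).isEmpty := by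
    rw [Bool.eq_iff_iff]
    simp [List.isEmpty_iff, PySem.List.sorted_eq_nil_iff]
  rw [h2]

-- ===== VERDICT (by name: the statement is the Claim_ definition above) =====
theorem lexical_prefilter_spec : Claim_equal_lexical_prefilter := by
  intro jd_terms resume_phrases _hdom
  unfold Spec_lexical_prefilter lexical_prefilter lexical_prefilter_alt
  dsimp only
  rw [step_eq resume_phrases]
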